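-- pv_equiv track=rewrite | github.com/MultiAgenticSwarm/MultiAgenticSwarm | implementations/flutterswarm/agents/architect.py | _extract_architecture_files_from_response
-- ===== SOURCE A (Python) =====
-- from typing import Any, Dict, List, Optional
--
-- def _extract_architecture_files_from_response(
--     response: str
-- ) -> List[Dict[str, str]]:
--     """Extract architecture files from LLM response"""
--     files = []
--
--     lines = response.split("\n")
--     current_file = None
--     current_content = []
--
--     for line in lines:
--         if line.strip().startswith("ARCH_FILE:") or line.strip().startswith("doc/"):
--             if current_file:
--                 files.append(
--                     {"path": current_file, "content": "\n".join(current_content)}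
--                 )
--
--             current_file = (
--                 line.split(":", 1)[1].strip() if ":" in line else line.strip()
--             )
--             current_content = []
--         elif current_file and line.strip():
--             current_content.append(line)
--
--     if current_file:
--         files.append({"path": current_file, "content": "\n".join(current_content)})
--
--     return files
-- ===== SOURCE B (Python) =====
-- def _is_header(line):
--     s = line.strip()
--     return s.startswith("ARCH_FILE:") or s.startswith("doc/")
--
--
-- def _path_of(line):
--     return line.split(":", 1)[1].strip() if ":" in line else line.strip()
--
--
-- def _segments(lines):
--     """lines starts with a header (or is empty): list of (header, body) pairs."""
--     if not lines:
--         return []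
--     rest = lines[1:]
--     j = 0
--     while j < len(rest) and not _is_header(rest[j]):
--         j += 1
--     return [(lines[0], rest[:j])] + _segments(rest[j:])
--
--
-- def _extract_architecture_files_from_response(response):
--     lines = response.split("\n")
--     while lines and not _is_header(lines[0]):
--         lines = lines[1:]
--     out = []
--     for header, body in _segments(lines):
--         path = _path_of(header)
--         if path:
--             out.append({
--                 "path": path,
--                 "content": "\n".join(l for l in body if l.strip()),
--             })
--     return out
-- ===== Notes on version B (the rewrite author's own statement) =====
-- stated objective: alternative
-- what changed: Replaces A's stateful single pass (current_file/current_content accumulators with a trailing flush) by a boundaries-then-segments decomposition: drop the prefix before the first header, recursively split the lines into (header, body) segments, then emit one entry per segment whose path is non-empty.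
import Mathlib
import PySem

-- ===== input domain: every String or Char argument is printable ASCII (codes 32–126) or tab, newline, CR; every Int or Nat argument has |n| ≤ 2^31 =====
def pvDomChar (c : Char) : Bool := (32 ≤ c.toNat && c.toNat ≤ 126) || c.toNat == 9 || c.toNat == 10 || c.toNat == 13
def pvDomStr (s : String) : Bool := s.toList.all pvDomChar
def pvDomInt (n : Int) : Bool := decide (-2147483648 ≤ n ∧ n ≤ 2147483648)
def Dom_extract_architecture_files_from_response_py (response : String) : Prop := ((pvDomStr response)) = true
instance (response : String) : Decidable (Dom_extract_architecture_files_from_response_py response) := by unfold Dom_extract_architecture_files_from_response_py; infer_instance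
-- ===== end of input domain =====

-- B replaces A's stateful single pass by a boundaries-then-segments decomposition (alternative, same cost).

-- ===== PORT A =====
-- A's loop state: (files, current_file, current_content); None ↔ Option.none, '' is falsy
def pvTruthy (cf : Option String) : Bool :=
  match cf with
  | none => false
  | some s => !(s == "")

def pvStepA (st : List (List (String × String)) × Option String × List String) (line : String) :
    List (List (String × String)) × Option String × List String :=
  if PySem.Str.startswith (PySem.Str.strip line) "ARCH_FILE:"
      || PySem.Str.startswith (PySem.Str.strip line) "doc/" then
    let files :=
      if pvTruthy st.2.1 then
        st.1 ++ [[("path", (st.2.1).getD ""), ("content", PySem.Str.join "\n" st.2.2)]]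
      else st.1
    (files,
     some (if PySem.Str.isIn ":" line
            then PySem.Str.strip (((PySem.Str.splitMax? line ":" 1).getD []).getD 1 "")
            else PySem.Str.strip line),
     [])
  else if pvTruthy st.2.1 && !(PySem.Str.strip line == "") then
    (st.1, st.2.1, st.2.2 ++ [line])
  else st

def extract_architecture_files_from_response_py (response : String) : List (List (String × String)) :=
  let lines := (PySem.Str.split? response "\n").getD []
  let st := lines.foldl pvStepA ([], none, [])
  if pvTruthy st.2.1 then
    st.1 ++ [[("path", (st.2.1).getD ""), ("content", PySem.Str.join "\n" st.2.2)]]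
  else st.1

-- ===== PORT B =====
def pvIsHdr (line : String) : Bool :=
  PySem.Str.startswith (PySem.Str.strip line) "ARCH_FILE:"
    || PySem.Str.startswith (PySem.Str.strip line) "doc/"

def pvPathOf (line : String) : String :=
  if PySem.Str.isIn ":" line
    then PySem.Str.strip (((PySem.Str.splitMax? line ":" 1).getD []).getD 1 "")
    else PySem.Str.strip line

def pvSegments : List String → List (String × List String)
  | [] => []
  | h :: rest =>
    (h, rest.takeWhile (fun l => !pvIsHdr l)) :: pvSegments (rest.dropWhile (fun l => !pvIsHdr l))
termination_by ls => ls.length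
decreasing_by
  exact Nat.lt_succ_of_le (List.length_dropWhile_le _ _)

def pvEmit (seg : String × List String) : Option (List (String × String)) :=
  let p := pvPathOf seg.1
  if p == "" then none
  else some [("path", p),
             ("content", PySem.Str.join "\n" (seg.2.filter (fun l => !(PySem.Str.strip l == ""))))]

def extract_architecture_files_from_response_py_alt (response : String) : List (List (String × String)) :=
  let lines := (PySem.Str.split? response "\n").getD []
  (pvSegments (lines.dropWhile (fun l => !pvIsHdr l))).filterMap pvEmit

-- ===== PRECONDITION & SPEC =====
def Spec_extract_architecture_files_from_response_py (response : String) (out : List (List (String × String))) : Prop := out = extract_architecture_files_from_response_py_alt response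
instance (response : String) (out : List (List (String × String))) : Decidable (Spec_extract_architecture_files_from_response_py response out) := by unfold Spec_extract_architecture_files_from_response_py; infer_instance

-- ===== CLAIM (what is proved, stated in full; the proofs are below) =====
def Claim_equal_extract_architecture_files_from_response_py : Prop := ∀ (response : String), Dom_extract_architecture_files_from_response_py response → Spec_extract_architecture_files_from_response_py response (extract_architecture_files_from_response_py response)

-- ===== LEMMAS AND PROOFS =====
def pvFinish (st : List (List (String × String)) × Option String × List String) :
    List (List (String × String)) :=
  if pvTruthy st.2.1 then
    st.1 ++ [[("path", (st.2.1).getD ""), ("content", PySem.Str.join "\n" st.2.2)]]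
  else st.1

lemma pvLoop_eq (ls : List String) :
    ∀ (files : List (List (String × String))) (cf : Option String) (content : List String),
    pvFinish (ls.foldl pvStepA (files, cf, content)) =
      files
        ++ (if pvTruthy cf then
              [[("path", cf.getD ""),
                ("content", PySem.Str.join "\n"
                   (content ++ (ls.takeWhile (fun l => !pvIsHdr l)).filter
                      (fun l => !(PySem.Str.strip l == ""))))]]
            else [])
        ++ (pvSegments (ls.dropWhile (fun l => !pvIsHdr l))).filterMap pvEmit := by
  induction ls with
  | nil =>
    intro files cf content
    cases cf with
    | none => simp [pvFinish, pvTruthy, pvSegments]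
    | some p =>
      by_cases hp : p = "" <;> simp [pvFinish, pvTruthy, pvSegments, hp]
  | cons l t ih =>
    intro files cf content
    by_cases hh : pvIsHdr l
    · have hstep : pvStepA (files, cf, content) l =
        ((if pvTruthy cf then
            files ++ [[("path", cf.getD ""), ("content", PySem.Str.join "\n" content)]]
          else files), some (pvPathOf l), []) := by
        simp only [pvStepA, pvIsHdr, pvPathOf] at hh ⊢
        rw [if_pos hh]
      simp only [List.foldl_cons, hstep, ih]
      rw [List.dropWhile_cons_of_neg (by simp [hh]), List.takeWhile_cons_of_neg (by simp [hh])]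
      rw [pvSegments]
      by_cases hp : pvPathOf l = ""
      · have : pvEmit (l, t.takeWhile (fun l => !pvIsHdr l)) = none := by
          simp [pvEmit, hp]
        simp [pvTruthy, hp, this]
        split <;> simp
        split <;> simp
      · have : pvEmit (l, t.takeWhile (fun l => !pvIsHdr l)) =
          some [("path", pvPathOf l),
                ("content", PySem.Str.join "\n"
                  ((t.takeWhile (fun l => !pvIsHdr l)).filter
                    (fun l => !(PySem.Str.strip l == ""))))] := by
          simp [pvEmit, hp]
        simp [pvTruthy, hp, this]
        split <;> simp
        split <;> simp
    · rw [List.dropWhile_cons_of_pos (by simp [hh]), List.takeWhile_cons_of_pos (by simp [hh])]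
      by_cases hc : pvTruthy cf
      · by_cases hk : PySem.Str.strip l == ""
        · have hstep : pvStepA (files, cf, content) l = (files, cf, content) := by
            simp only [pvStepA, pvIsHdr] at hh ⊢
            rw [if_neg hh, if_neg (by simp [hk])]
          simp [List.foldl_cons, hstep, ih, hc, hk]
        · have hstep : pvStepA (files, cf, content) l = (files, cf, content ++ [l]) := by
            simp only [pvStepA, pvIsHdr] at hh ⊢
            rw [if_neg hh, if_pos (by simp [hc, hk])]
          simp [List.foldl_cons, hstep, ih, hc, hk]
      · have hstep : pvStepA (files, cf, content) l = (files, cf, content) := by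
          simp only [pvStepA, pvIsHdr] at hh ⊢
          rw [if_neg hh, if_neg (by simp [hc])]
        simp [List.foldl_cons, hstep, ih, hc]

-- ===== VERDICT (by name: the statement is the Claim_ definition above) =====
theorem extract_architecture_files_from_response_py_spec : Claim_equal_extract_architecture_files_from_response_py := by
  intro response _
  unfold Spec_extract_architecture_files_from_response_py
  unfold extract_architecture_files_from_response_py extract_architecture_files_from_response_py_alt
  have h := pvLoop_eq ((PySem.Str.split? response "\n").getD []) [] none []
  simpa [pvFinish, pvTruthy] using h
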